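-- pv_equiv track=rewrite | github.com/Aguu21/Python | Ejercicio16a.py | consonantesLetras
-- ===== SOURCE A (Python) =====
-- def consonantesLetras(cadena):
--     '''Dada una cadena, entrega las letras consonantes'''
--
--     cadena = cadena.split(' ')
--     vocales = ''
--     resultado = ''
--
--     for i in range(0, len(cadena)):
--         palabra = cadena[i]
--
--         for x in range(0, len(palabra)):
--             if palabra[x] not in ["a", "A", "e", "E", "i", "I", "o", "O", "u", "U"]:
--                 resultado += palabra[x]
--
--         if i != (len(cadena)-1):
--             resultado += " "
--
--     return resultado
-- ===== SOURCE B (Python) =====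
-- def consonantesLetras(cadena):
--     '''Dada una cadena, entrega las letras consonantes'''
--     # Spaces are never vowels, so one flat vowel-filter over the raw string
--     # reproduces the split/rejoin of the original exactly.
--     return ''.join(c for c in cadena if c not in "aAeEiIoOuU")
-- ===== Notes on version B (the rewrite author's own statement) =====
-- stated objective: simpler
-- what changed: Replaced the split-on-space / nested index loops / manual space-reinsertion with a single flat pass over the raw string keeping every non-vowel character (spaces are never vowels, so spacing is preserved automatically).
import Mathlib
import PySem

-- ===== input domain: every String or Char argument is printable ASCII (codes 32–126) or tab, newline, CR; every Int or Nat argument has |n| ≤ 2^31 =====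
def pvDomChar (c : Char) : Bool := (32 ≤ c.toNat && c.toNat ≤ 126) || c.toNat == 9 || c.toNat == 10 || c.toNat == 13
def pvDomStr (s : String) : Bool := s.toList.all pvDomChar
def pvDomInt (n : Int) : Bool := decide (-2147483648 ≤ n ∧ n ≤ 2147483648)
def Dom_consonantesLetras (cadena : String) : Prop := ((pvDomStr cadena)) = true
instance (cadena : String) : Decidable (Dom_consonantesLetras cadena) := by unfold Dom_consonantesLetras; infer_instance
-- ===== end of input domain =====

-- B replaces A's split-on-space + nested index loops + manual space reinsertion by one
-- flat vowel-filter pass over the raw string (spaces are never vowels, so spacing survives).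

-- ===== PORT A =====
def consonantesLetras (cadena : String) : String :=
  -- cadena = cadena.split(' ')   (vocales = '' is unused in A)
  let cadenaL : List (List Char) := PySem.Chars.splitOn cadena.toList [' ']
  let resultado : List Char :=
    (PySem.List.pyRange 0 ((cadenaL.length : Int)) 1).foldl (fun resultado i =>
      let palabra : List Char := PySem.List.pyGetD cadenaL i []
      let resultado :=
        (PySem.List.pyRange 0 ((palabra.length : Int)) 1).foldl (fun resultado x =>
          if !(['a','A','e','E','i','I','o','O','u','U'].contains (PySem.List.pyGetD palabra x ' '))
          then resultado ++ [PySem.List.pyGetD palabra x ' ']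
          else resultado) resultado
      if i ≠ (cadenaL.length : Int) - 1 then resultado ++ [' '] else resultado) []
  String.ofList resultado

-- ===== PORT B =====
def consonantesLetras_alt (cadena : String) : String :=
  String.ofList (cadena.toList.filter (fun c => !("aAeEiIoOuU".toList.contains c)))

-- ===== PRECONDITION & SPEC =====
def Spec_consonantesLetras (cadena : String) (out : String) : Prop := out = consonantesLetras_alt cadena
instance (cadena : String) (out : String) : Decidable (Spec_consonantesLetras cadena out) := by unfold Spec_consonantesLetras; infer_instance

-- ===== CLAIM (what is proved, stated in full; the proofs are below) =====
def Claim_equal_consonantesLetras : Prop := ∀ (cadena : String), Dom_consonantesLetras cadena → Spec_consonantesLetras cadena (consonantesLetras cadena)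

-- ===== LEMMAS AND PROOFS =====

-- keep = "is not a vowel" (A's membership test, negated)
def pvKeep (c : Char) : Bool := !(['a','A','e','E','i','I','o','O','u','U'].contains c)

-- structural model of cadena.split(' ')
def pvSplit : List Char → List (List Char)
  | [] => [[]]
  | c :: rest =>
    if c = ' ' then [] :: pvSplit rest
    else match pvSplit rest with
      | [] => [[c]]
      | w :: ws => (c :: w) :: ws

def pvConsFirst (p : List Char) : List (List Char) → List (List Char)
  | [] => [p]
  | w :: ws => (p ++ w) :: ws

-- A's outer loop: filtered words joined by a single space
def pvJoinSp : List (List Char) → List Char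
  | [] => []
  | [w] => w.filter pvKeep
  | w :: w2 :: ws => w.filter pvKeep ++ ' ' :: pvJoinSp (w2 :: ws)

lemma pvSplit_ne_nil (cs : List Char) : pvSplit cs ≠ [] := by
  induction cs with
  | nil => simp [pvSplit]
  | cons c rest ih =>
    simp only [pvSplit]
    split
    · simp
    · cases h : pvSplit rest <;> simp

lemma pv_go_eq (fuel : Nat) : ∀ (l cur : List Char) (accl : List (List Char)),
    l.length ≤ fuel →
    PySem.Chars.splitOn.go [' '] fuel l cur accl =
      accl.reverse ++ pvConsFirst cur.reverse (pvSplit l) := by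
  induction fuel with
  | zero =>
    intro l cur accl hl
    have : l = [] := by cases l <;> simp_all
    subst this
    simp [PySem.Chars.splitOn.go, pvSplit, pvConsFirst]
  | succ fuel ih =>
    intro l cur accl hl
    cases l with
    | nil => simp [PySem.Chars.splitOn.go, pvSplit, pvConsFirst]
    | cons c rest =>
      rw [PySem.Chars.splitOn.go]
      by_cases hc : c = ' '
      · subst hc
        have hpre : [' '].isPrefixOf (' ' :: rest) = true := by simp
        rw [if_pos hpre]
        rw [show List.drop [' '].length (' ' :: rest) = rest from rfl,
           ih rest [] _ (by simpa using Nat.le_of_succ_le_succ hl)]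
        obtain ⟨w, ws, hws⟩ : ∃ w ws, pvSplit rest = w :: ws := by
          cases h : pvSplit rest with
          | nil => exact absurd h (pvSplit_ne_nil rest)
          | cons w ws => exact ⟨w, ws, rfl⟩
        simp [pvSplit, hws, pvConsFirst]
      · have hpre : [' '].isPrefixOf (c :: rest) = false := by
          simp [List.isPrefixOf]
          exact fun h => hc h.symm
        rw [if_neg (by simp [hpre])]
        rw [ih rest (c :: cur) accl (by simpa using Nat.le_of_succ_le_succ hl)]
        obtain ⟨w, ws, hws⟩ : ∃ w ws, pvSplit rest = w :: ws := by
          cases h : pvSplit rest with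
          | nil => exact absurd h (pvSplit_ne_nil rest)
          | cons w ws => exact ⟨w, ws, rfl⟩
        simp [pvSplit, hc, hws, pvConsFirst]

lemma pv_splitOn_eq (cs : List Char) :
    PySem.Chars.splitOn cs [' '] = pvSplit cs := by
  unfold PySem.Chars.splitOn
  rw [pv_go_eq (cs.length + 1) cs [] [] (by omega)]
  obtain ⟨w, ws, hws⟩ : ∃ w ws, pvSplit cs = w :: ws := by
    cases h : pvSplit cs with
    | nil => exact absurd h (pvSplit_ne_nil cs)
    | cons w ws => exact ⟨w, ws, rfl⟩
  simp [hws, pvConsFirst]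

lemma pvJoinSp_cons_cons (c : Char) (w : List Char) (ws : List (List Char)) :
    pvJoinSp ((c :: w) :: ws) = (if pvKeep c then [c] else []) ++ pvJoinSp (w :: ws) := by
  cases ws <;> simp [pvJoinSp, List.filter_cons] <;> split <;> simp

lemma pvJoinSp_pvSplit (cs : List Char) :
    pvJoinSp (pvSplit cs) = cs.filter pvKeep := by
  induction cs with
  | nil => simp [pvSplit, pvJoinSp]
  | cons c rest ih =>
    by_cases hc : c = ' '
    · subst hc
      obtain ⟨w, ws, hws⟩ : ∃ w ws, pvSplit rest = w :: ws := by
        cases h : pvSplit rest with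
        | nil => exact absurd h (pvSplit_ne_nil rest)
        | cons w ws => exact ⟨w, ws, rfl⟩
      have hk : pvKeep ' ' = true := by decide
      show pvJoinSp ([] :: pvSplit rest) = List.filter pvKeep (' ' :: rest)
      rw [hws]
      simp only [pvJoinSp, List.filter_cons, hk, List.filter_nil, List.nil_append]
      rw [← hws, ih]
      simp
    · obtain ⟨w, ws, hws⟩ : ∃ w ws, pvSplit rest = w :: ws := by
        cases h : pvSplit rest with
        | nil => exact absurd h (pvSplit_ne_nil rest)
        | cons w ws => exact ⟨w, ws, rfl⟩
      simp only [pvSplit, if_neg hc, hws, pvJoinSp_cons_cons, List.filter_cons]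
      rw [← hws, ih]
      split <;> simp

-- A's outer loop body after the inner loop is summarised
def pvBody (ws : List (List Char)) (r : List Char) (i : Int) : List Char :=
  let r' := r ++ (PySem.List.pyGetD ws i []).filter pvKeep
  if i ≠ (ws.length : Int) - 1 then r' ++ [' '] else r'

lemma pv_outer (ws : List (List Char)) : ∀ (d k : Nat) (r : List Char),
    ws.length = k + d + 1 →
    (PySem.List.pyRange (k : Int) ((ws.length : Int)) 1).foldl (pvBody ws) r =
      r ++ pvJoinSp (ws.drop k) := by
  intro d
  induction d with
  | zero =>
    intro k r h
    have hk : k < ws.length := by omega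
    have hcast : (ws.length : Int) = (k : Int) + 1 := by rw [h]; push_cast; ring
    rw [hcast, PySem.List.pyRange_one_singleton, List.foldl_cons, List.foldl_nil]
    unfold pvBody
    rw [if_neg (by omega)]
    rw [PySem.List.pyGetD_natCast, List.getD_eq_getElem ws [] hk]
    rw [List.drop_eq_getElem_cons hk, List.drop_eq_nil_of_le (by omega)]
    rfl
  | succ d ih =>
    intro k r h
    have hk : k < ws.length := by omega
    have hk1 : k + 1 < ws.length := by omega
    rw [PySem.List.pyRange_one_cons (by exact_mod_cast hk), List.foldl_cons]
    have hstep : pvBody ws r (k : Int) = (r ++ (ws[k]).filter pvKeep) ++ [' '] := by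
      unfold pvBody
      rw [if_pos (by omega), PySem.List.pyGetD_natCast, List.getD_eq_getElem ws [] hk]
    rw [hstep]
    have : ((k : Int) + 1) = ((k + 1 : Nat) : Int) := by push_cast; ring
    rw [this, ih (k + 1) _ (by omega)]
    rw [List.drop_eq_getElem_cons hk, List.drop_eq_getElem_cons hk1]
    rw [show ws[k] :: ws[k+1] :: ws.drop (k+2) = ws[k] :: (ws[k+1] :: ws.drop (k+2)) from rfl]
    simp only [pvJoinSp]
    rw [← List.drop_eq_getElem_cons hk1]
    simp

lemma pv_main (cadena : String) :
    consonantesLetras cadena = String.ofList (cadena.toList.filter pvKeep) := by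
  unfold consonantesLetras
  rw [pv_splitOn_eq]
  have hbody : (fun (resultado : List Char) (i : Int) =>
      let palabra : List Char := PySem.List.pyGetD (pvSplit cadena.toList) i []
      let resultado :=
        (PySem.List.pyRange 0 ((palabra.length : Int)) 1).foldl (fun resultado x =>
          if !(['a','A','e','E','i','I','o','O','u','U'].contains (PySem.List.pyGetD palabra x ' '))
          then resultado ++ [PySem.List.pyGetD palabra x ' ']
          else resultado) resultado
      if i ≠ ((pvSplit cadena.toList).length : Int) - 1 then resultado ++ [' '] else resultado)
      = pvBody (pvSplit cadena.toList) := by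
    funext r i
    unfold pvBody
    dsimp only
    rw [PySem.List.foldl_pyRange_zero_pyGetD'
         (PySem.List.pyGetD (pvSplit cadena.toList) i []) ' '
         (fun acc c => if !(['a','A','e','E','i','I','o','O','u','U'].contains c)
                       then acc ++ [c] else acc) r]
    rw [PySem.List.foldl_append_if_eq_filter]
    rfl
  dsimp only
  rw [hbody]
  obtain ⟨w, ws', hcons⟩ : ∃ w ws', pvSplit cadena.toList = w :: ws' := by
    cases h : pvSplit cadena.toList with
    | nil => exact absurd h (pvSplit_ne_nil cadena.toList)
    | cons w ws => exact ⟨w, ws, rfl⟩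
  have hlen : (pvSplit cadena.toList).length = 0 + ((pvSplit cadena.toList).length - 1) + 1 := by
    rw [hcons]; simp
  rw [show ((0 : Int) = ((0 : Nat) : Int)) from rfl,
     pv_outer (pvSplit cadena.toList) ((pvSplit cadena.toList).length - 1) 0 [] hlen]
  rw [List.drop_zero, pvJoinSp_pvSplit, List.nil_append]

-- ===== VERDICT (by name: the statement is the Claim_ definition above) =====
theorem consonantesLetras_spec : Claim_equal_consonantesLetras := by
  intro cadena _
  unfold Spec_consonantesLetras consonantesLetras_alt
  have hlit : "aAeEiIoOuU".toList = ['a','A','e','E','i','I','o','O','u','U'] := by decide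
  rw [pv_main cadena, hlit]
  rfl
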